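-- pv_equiv track=rewrite | github.com/Abheelash-Mishra/Competitive-Programming-Repo | Implementation/24_Boring Apartments.py | solve
-- ===== SOURCE A (Python) =====
-- def solve(x):
--     count = 0
--
--     for i in range(1, 10):
--         s = ""
--         for j in range(1, 5):
--             s += str(i)
--             count += j
--
--             if s == x:
--                 return count
-- ===== SOURCE B (Python) =====
-- def solve(x):
--     L = len(x)
--     if 1 <= L <= 4 and x == x[0] * L and x[0] in "123456789":
--         d = "123456789".index(x[0]) + 1
--         return 10 * (d - 1) + L * (L + 1) // 2
-- ===== Notes on version B (the rewrite author's own statement) =====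
-- stated objective: simpler
-- what changed: Replaced the nested enumeration loop over all 36 boring numbers by a direct validity check on x (repeated nonzero digit, length 1..4) plus the closed form 10*(d-1)+L*(L+1)//2.
import Mathlib
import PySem

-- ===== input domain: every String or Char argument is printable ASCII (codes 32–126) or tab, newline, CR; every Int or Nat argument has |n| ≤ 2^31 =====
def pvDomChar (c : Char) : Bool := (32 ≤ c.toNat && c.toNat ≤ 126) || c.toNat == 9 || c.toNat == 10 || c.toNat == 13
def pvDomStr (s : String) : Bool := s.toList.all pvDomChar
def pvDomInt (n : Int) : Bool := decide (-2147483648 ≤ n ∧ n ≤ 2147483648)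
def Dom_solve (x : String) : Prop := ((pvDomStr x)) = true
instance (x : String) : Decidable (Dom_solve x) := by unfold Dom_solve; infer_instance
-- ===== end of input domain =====

-- B replaces A's nested enumeration of all 36 boring numbers by a direct validity
-- check on x plus a closed-form count (objective: simpler).

-- ===== PORT A =====
-- inner loop: for j in range(1,5): s += str(i); count += j; if s == x: return count
def solveInner (x : String) (i : Int) : List Int → String → Int → String × Int × Option Int
  | [], s, count => (s, count, none)
  | j :: js, s, count =>
      let s' := s ++ PySem.Int.toStr i
      let count' := count + j
      if s' = x then (s', count', some count') else solveInner x i js s' count'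

-- outer loop: for i in range(1, 10): s = ""; <inner loop>
def solveOuter (x : String) : List Int → Int → Option Int
  | [], _ => none
  | i :: is, count =>
      match solveInner x i (PySem.List.pyRange 1 5 1) "" count with
      | (_, _, some c) => some c
      | (_, count', none) => solveOuter x is count'

def solve (x : String) : Option Int := solveOuter x (PySem.List.pyRange 1 10 1) 0

-- ===== PORT B =====
def solve_alt (x : String) : Option Int :=
  let l := x.toList
  let L : Int := l.length
  if 1 ≤ L ∧ L ≤ 4 ∧ l = List.replicate l.length l.head! ∧ l.head! ∈ "123456789".toList then
    let d : Int := ((PySem.List.index? "123456789".toList l.head!).getD 0 : Int) + 1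
    some (10 * (d - 1) + PySem.Int.floordiv (L * (L + 1)) 2)
  else none

-- ===== PRECONDITION & SPEC =====
def Spec_solve (x : String) (out : Option Int) : Prop := out = solve_alt x
instance (x : String) (out : Option Int) : Decidable (Spec_solve x out) := by unfold Spec_solve; infer_instance

-- ===== CLAIM (what is proved, stated in full; the proofs are below) =====
def Claim_equal_solve : Prop := ∀ (x : String), Dom_solve x → Spec_solve x (solve x)

-- ===== LEMMAS AND PROOFS =====

-- the 36 boring apartment numbers, in A's scan order
def pvBoring : List String :=
  ["1", "11", "111", "1111", "2", "22", "222", "2222", "3", "33", "333", "3333",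
   "4", "44", "444", "4444", "5", "55", "555", "5555", "6", "66", "666", "6666",
   "7", "77", "777", "7777", "8", "88", "888", "8888", "9", "99", "999", "9999"]

set_option maxHeartbeats 1000000 in
-- A never matches: when x is not a boring number every comparison in the loop fails
theorem solve_none (x : String) (hx : x ∉ pvBoring) : solve x = none := by
  have key : ∀ s ∈ pvBoring, ¬(s = x) := fun s hs h => hx (h ▸ hs)
  unfold solve
  rw [show PySem.List.pyRange 1 10 1 = [1,2,3,4,5,6,7,8,9] from by decide]
  simp only [solveOuter, show PySem.List.pyRange 1 5 1 = [1,2,3,4] from by decide, solveInner,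
    show PySem.Int.toStr 1 = "1" from by decide,
    show ("" : String) ++ "1" = "1" from by decide,
    if_neg (key "1" (by decide)),
    show ("1" : String) ++ "1" = "11" from by decide,
    if_neg (key "11" (by decide)),
    show ("11" : String) ++ "1" = "111" from by decide,
    if_neg (key "111" (by decide)),
    show ("111" : String) ++ "1" = "1111" from by decide,
    if_neg (key "1111" (by decide)),
    show PySem.Int.toStr 2 = "2" from by decide,
    show ("" : String) ++ "2" = "2" from by decide,
    if_neg (key "2" (by decide)),
    show ("2" : String) ++ "2" = "22" from by decide,
    if_neg (key "22" (by decide)),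
    show ("22" : String) ++ "2" = "222" from by decide,
    if_neg (key "222" (by decide)),
    show ("222" : String) ++ "2" = "2222" from by decide,
    if_neg (key "2222" (by decide)),
    show PySem.Int.toStr 3 = "3" from by decide,
    show ("" : String) ++ "3" = "3" from by decide,
    if_neg (key "3" (by decide)),
    show ("3" : String) ++ "3" = "33" from by decide,
    if_neg (key "33" (by decide)),
    show ("33" : String) ++ "3" = "333" from by decide,
    if_neg (key "333" (by decide)),
    show ("333" : String) ++ "3" = "3333" from by decide,
    if_neg (key "3333" (by decide)),
    show PySem.Int.toStr 4 = "4" from by decide,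
    show ("" : String) ++ "4" = "4" from by decide,
    if_neg (key "4" (by decide)),
    show ("4" : String) ++ "4" = "44" from by decide,
    if_neg (key "44" (by decide)),
    show ("44" : String) ++ "4" = "444" from by decide,
    if_neg (key "444" (by decide)),
    show ("444" : String) ++ "4" = "4444" from by decide,
    if_neg (key "4444" (by decide)),
    show PySem.Int.toStr 5 = "5" from by decide,
    show ("" : String) ++ "5" = "5" from by decide,
    if_neg (key "5" (by decide)),
    show ("5" : String) ++ "5" = "55" from by decide,
    if_neg (key "55" (by decide)),
    show ("55" : String) ++ "5" = "555" from by decide,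
    if_neg (key "555" (by decide)),
    show ("555" : String) ++ "5" = "5555" from by decide,
    if_neg (key "5555" (by decide)),
    show PySem.Int.toStr 6 = "6" from by decide,
    show ("" : String) ++ "6" = "6" from by decide,
    if_neg (key "6" (by decide)),
    show ("6" : String) ++ "6" = "66" from by decide,
    if_neg (key "66" (by decide)),
    show ("66" : String) ++ "6" = "666" from by decide,
    if_neg (key "666" (by decide)),
    show ("666" : String) ++ "6" = "6666" from by decide,
    if_neg (key "6666" (by decide)),
    show PySem.Int.toStr 7 = "7" from by decide,
    show ("" : String) ++ "7" = "7" from by decide,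
    if_neg (key "7" (by decide)),
    show ("7" : String) ++ "7" = "77" from by decide,
    if_neg (key "77" (by decide)),
    show ("77" : String) ++ "7" = "777" from by decide,
    if_neg (key "777" (by decide)),
    show ("777" : String) ++ "7" = "7777" from by decide,
    if_neg (key "7777" (by decide)),
    show PySem.Int.toStr 8 = "8" from by decide,
    show ("" : String) ++ "8" = "8" from by decide,
    if_neg (key "8" (by decide)),
    show ("8" : String) ++ "8" = "88" from by decide,
    if_neg (key "88" (by decide)),
    show ("88" : String) ++ "8" = "888" from by decide,
    if_neg (key "888" (by decide)),
    show ("888" : String) ++ "8" = "8888" from by decide,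
    if_neg (key "8888" (by decide)),
    show PySem.Int.toStr 9 = "9" from by decide,
    show ("" : String) ++ "9" = "9" from by decide,
    if_neg (key "9" (by decide)),
    show ("9" : String) ++ "9" = "99" from by decide,
    if_neg (key "99" (by decide)),
    show ("99" : String) ++ "9" = "999" from by decide,
    if_neg (key "999" (by decide)),
    show ("999" : String) ++ "9" = "9999" from by decide,
    if_neg (key "9999" (by decide))]

theorem mem_of_toList_mem (x : String) (h : x.toList ∈ pvBoring.map String.toList) :
    x ∈ pvBoring := by
  obtain ⟨s, hs, he⟩ := List.mem_map.mp h
  exact String.toList_inj.mp he.symm ▸ hs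

set_option maxHeartbeats 1000000 in
theorem boring_of_valid (x : String)
    (h1 : (1 : Int) ≤ (x.toList.length : Int)) (h2 : ((x.toList.length : Int)) ≤ 4)
    (h3 : x.toList = List.replicate x.toList.length x.toList.head!)
    (h4 : x.toList.head! ∈ "123456789".toList) : x ∈ pvBoring := by
  apply mem_of_toList_mem
  rcases hl : x.toList with _ | ⟨a, _ | ⟨b, _ | ⟨c, _ | ⟨d, rest⟩⟩⟩⟩
  · simp [hl] at h1
  · rw [hl] at h4; simp at h4
    rcases h4 with rfl|rfl|rfl|rfl|rfl|rfl|rfl|rfl|rfl <;> decide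
  · rw [hl] at h3 h4
    simp [List.replicate] at h3
    obtain rfl := h3
    simp at h4
    rcases h4 with rfl|rfl|rfl|rfl|rfl|rfl|rfl|rfl|rfl <;> decide
  · rw [hl] at h3 h4
    simp [List.replicate] at h3
    obtain ⟨rfl, rfl⟩ := h3
    simp at h4
    rcases h4 with rfl|rfl|rfl|rfl|rfl|rfl|rfl|rfl|rfl <;> decide
  · rcases rest with _ | ⟨e, rest⟩
    · rw [hl] at h3 h4
      simp [List.replicate] at h3
      obtain ⟨rfl, rfl, rfl⟩ := h3
      simp at h4
      rcases h4 with rfl|rfl|rfl|rfl|rfl|rfl|rfl|rfl|rfl <;> decide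
    · rw [hl] at h2; simp at h2; omega

theorem solve_alt_none (x : String) (hx : x ∉ pvBoring) : solve_alt x = none := by
  unfold solve_alt
  rw [if_neg]
  rintro ⟨h1, h2, h3, h4⟩
  exact hx (boring_of_valid x h1 h2 h3 h4)

-- ===== VERDICT (by name: the statement is the Claim_ definition above) =====
theorem solve_spec : Claim_equal_solve := by
  intro x _
  unfold Spec_solve
  by_cases hx : x ∈ pvBoring
  · fin_cases hx <;> decide
  · rw [solve_none x hx, solve_alt_none x hx]
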